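-- pv_equiv track=rewrite | github.com/leonardo-pinto/trybe-exercises | bloco_36/dia_2/exercise1.py | stable_time
-- ===== SOURCE A (Python) =====
-- def stable_time(arr):
--   time_sequence = []
--   system_ok = 0
--   for i in range(len(arr)):
--     if (arr[i] == 1):
--       system_ok += 1
--     else:
--       time_sequence.append(system_ok)
--       system_ok = 0
--   return max(time_sequence)
-- ===== SOURCE B (Python) =====
-- def stable_time(arr):
--     # Separator-table decomposition: find positions of non-1 elements once,
--     # then each run length is the gap between consecutive separators.
--     seps = [i for i, x in enumerate(arr) if x != 1]
--     runs = []
--     prev = -1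
--     for i in seps:
--         runs.append(i - prev - 1)
--         prev = i
--     return max(runs)
-- ===== Notes on version B (the rewrite author's own statement) =====
-- stated objective: alternative
-- what changed: Instead of a running counter reset at each non-1 element, B first builds the table of separator positions and derives each run length as the gap between consecutive separator indices.
import Mathlib
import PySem

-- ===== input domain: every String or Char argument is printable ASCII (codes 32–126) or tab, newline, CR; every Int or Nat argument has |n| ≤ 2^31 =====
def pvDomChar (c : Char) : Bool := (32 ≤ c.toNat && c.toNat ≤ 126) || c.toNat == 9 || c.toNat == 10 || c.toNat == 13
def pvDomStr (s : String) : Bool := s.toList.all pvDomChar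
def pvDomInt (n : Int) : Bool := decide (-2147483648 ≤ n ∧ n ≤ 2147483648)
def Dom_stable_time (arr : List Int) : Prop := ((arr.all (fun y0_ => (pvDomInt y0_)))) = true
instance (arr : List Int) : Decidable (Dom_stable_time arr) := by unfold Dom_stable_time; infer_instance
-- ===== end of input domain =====

-- B replaces A's running counter (reset at each non-1 element) by a separator-position
-- table whose consecutive gaps are the run lengths; alternative decomposition, same cost.


-- ===== PORT A =====
-- for i in range(len(arr)): grow system_ok on 1, else append and reset; return max(time_sequence)
def stable_time (arr : List Int) : Int :=
  let st := (PySem.List.pyRange 0 (arr.length : Int) 1).foldl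
    (fun (s : List Int × Int) i =>
      if PySem.List.pyGetD arr i 0 = 1 then (s.1, s.2 + 1)
      else (s.1 ++ [s.2], 0)) ([], 0)
  (PySem.List.max? st.1 (fun x => x)).getD 0    -- max([]) raises ValueError: excluded by Pre_

-- ===== PORT B =====
-- seps = [i for i, x in enumerate(arr) if x != 1]; runs from consecutive gaps; max(runs)
def stable_time_alt (arr : List Int) : Int :=
  let seps := ((PySem.List.enumerate arr).filter (fun q => decide (q.2 ≠ 1))).map Prod.fst
  let st := seps.foldl (fun (s : List Int × Int) i => (s.1 ++ [i - s.2 - 1], i)) ([], -1)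
  (PySem.List.max? st.1 (fun x => x)).getD 0    -- max([]) raises ValueError: excluded by Pre_

-- ===== PRECONDITION & SPEC =====
-- Pre_ excludes exactly the inputs with no non-1 element (incl. []), where Python A (and B) raise ValueError on max of an empty list.
def Pre_stable_time (arr : List Int) : Prop := arr.any (fun x => decide (x ≠ 1)) = true
instance (arr : List Int) : Decidable (Pre_stable_time arr) := by unfold Pre_stable_time; infer_instance
def pvWitness_stable_time : List Int := [1, 1, 0, 1]
def Spec_stable_time (arr : List Int) (out : Int) : Prop := out = stable_time_alt arr
instance (arr : List Int) (out : Int) : Decidable (Spec_stable_time arr out) := by unfold Spec_stable_time; infer_instance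

-- ===== CLAIM (what is proved, stated in full; the proofs are below) =====
def Claim_equal_stable_time : Prop := ∀ (arr : List Int), Dom_stable_time arr → Pre_stable_time arr → Spec_stable_time arr (stable_time arr)

-- ===== LEMMAS AND PROOFS =====

-- the sequence of completed run lengths of arr, given the running count ok of current 1s
def runsOf : List Int → Int → List Int
  | [], _ => []
  | x :: t, ok => if x = 1 then runsOf t (ok + 1) else ok :: runsOf t 0

theorem stable_time_foldl (arr : List Int) (seq : List Int) (ok : Int) :
    (arr.foldl (fun (s : List Int × Int) x =>
      if x = 1 then (s.1, s.2 + 1) else (s.1 ++ [s.2], 0)) (seq, ok)).1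
      = seq ++ runsOf arr ok := by
  induction arr generalizing seq ok with
  | nil => simp [runsOf]
  | cons x t ih =>
    by_cases hx : x = 1 <;> simp [runsOf, hx, ih, List.append_assoc]

theorem stable_time_alt_foldl (arr : List Int) (k p : Int) (acc : List Int) :
    ((((PySem.List.enumerate arr k).filter (fun q => decide (q.2 ≠ 1))).map Prod.fst).foldl
      (fun (s : List Int × Int) i => (s.1 ++ [i - s.2 - 1], i)) (acc, p)).1
      = acc ++ runsOf arr (k - p - 1) := by
  induction arr generalizing k p acc with
  | nil => simp [PySem.List.enumerate_nil, runsOf]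
  | cons x t ih =>
    rw [PySem.List.enumerate_cons]
    simp only [ne_eq, decide_not] at ih
    by_cases hx : x = 1
    · have h1 : k + 1 - p - 1 = k - p - 1 + 1 := by ring
      have := ih (k + 1) p acc
      rw [h1] at this
      simpa [hx, runsOf] using this
    · have h0 : k + 1 - k - 1 = (0 : Int) := by ring
      have := ih (k + 1) k (acc ++ [k - p - 1])
      rw [h0] at this
      simpa [hx, runsOf, List.append_assoc] using this

theorem stable_time_eq_alt (arr : List Int) : stable_time arr = stable_time_alt arr := by
  unfold stable_time stable_time_alt
  rw [PySem.List.foldl_pyRange_pyGetD' arr 0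
        (fun (s : List Int × Int) v => if v = 1 then (s.1, s.2 + 1) else (s.1 ++ [s.2], 0))
        (([] : List Int), (0 : Int)) (le_refl 0)]
  simp only [Int.toNat_zero, List.drop_zero]
  rw [stable_time_foldl]
  rw [stable_time_alt_foldl]
  norm_num

-- ===== VERDICT (by name: the statement is the Claim_ definition above) =====
theorem stable_time_spec : Claim_equal_stable_time := by
  intro arr _ _
  unfold Spec_stable_time
  exact stable_time_eq_alt arr
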